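-- pv_equiv track=rewrite | github.com/qqlaker/diplom | app/edu_programs/pdf_parsers/base.py | text_between_header_and_number
-- ===== SOURCE A (Python) =====
-- def text_between_header_and_number(text: str, header: str, skip: int = 0):  # skip - пропустить N цифр
--     # Находим начало раздела
--     if not header:  # можно не передавать header, если нужно искать сначала страницы
--         header_pos = 0
--     else:
--         header_pos = text.find(header)
--         if header_pos == -1:
--             return None
--
--     # Находим конец раздела - следующая цифра после заголовка
--     skipped = 0
--     next_number_pos = None
--     for i in range(header_pos + len(header), len(text)):
--         if text[i].isdigit():
--             next_number_pos = i
--             if skipped == skip: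
--                 break
--             skipped += 1
--
--     # Вырезаем текст раздела
--     if next_number_pos is None:
--         section_text = text[header_pos + len(header) :]
--     else:
--         section_text = text[header_pos + len(header) : next_number_pos]
--
--     return section_text
-- ===== SOURCE B (Python) =====
-- def text_between_header_and_number(text: str, header: str, skip: int = 0):
--     # Locate the start of the section.
--     if header:
--         p = text.find(header)
--         if p == -1:
--             return None
--         start = p + len(header)
--     else:
--         start = 0
--     tail = text[start:]
--     # Materialise all digit positions in the tail, then select the cut point.
--     positions = [i for i, c in enumerate(tail) if c.isdigit()]
--     if not positions:
--         return tail
--     cut = positions[skip] if 0 <= skip < len(positions) else positions[-1]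
--     return tail[:cut]
-- ===== Notes on version B (the rewrite author's own statement) =====
-- stated objective: simpler
-- what changed: Replaces the stateful early-breaking index loop (skipped counter, running next_number_pos) with one pass that materialises all digit positions in the tail and then selects the cut by index (skip-th if in range, else last).
import Mathlib
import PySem

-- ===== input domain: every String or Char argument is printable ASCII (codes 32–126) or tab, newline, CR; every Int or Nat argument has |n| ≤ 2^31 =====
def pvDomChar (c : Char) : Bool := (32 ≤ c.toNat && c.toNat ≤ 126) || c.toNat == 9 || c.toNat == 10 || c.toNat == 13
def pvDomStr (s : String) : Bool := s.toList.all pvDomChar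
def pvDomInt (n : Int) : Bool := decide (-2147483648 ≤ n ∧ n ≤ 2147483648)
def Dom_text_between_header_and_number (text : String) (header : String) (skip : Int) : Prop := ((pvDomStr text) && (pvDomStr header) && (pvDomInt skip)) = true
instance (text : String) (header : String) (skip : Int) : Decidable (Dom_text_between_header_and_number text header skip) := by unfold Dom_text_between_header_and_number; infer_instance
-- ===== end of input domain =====

-- B replaces A's early-breaking counter loop by materialising all digit positions and selecting the cut; objective: simpler.

-- ===== PORT A =====
-- the 'for i in range(start, len(text))' loop: structural recursion over the remaining
-- characters, carrying the absolute index i and the loop state (skipped, next_number_pos)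
def pvLoopA : List Char → Nat → Int → Int → Option Nat → Option Nat
  | [], _, _, _, npos => npos
  | c :: rest, i, skip, skipped, npos =>
    if PySem.Chars.isdigit c then
      if skipped = skip then some i          -- break with next_number_pos = i
      else pvLoopA rest (i+1) skip (skipped+1) (some i)
    else pvLoopA rest (i+1) skip skipped npos

def text_between_header_and_number (text : String) (header : String) (skip : Int) : Option String :=
  let cs := text.toList
  let hp? : Option Nat :=
    if header = "" then some 0
    else
      let p := PySem.Str.find text header
      if p = -1 then none else some p.toNat       -- find ≥ 0 here
  match hp? with
  | none => none
  | some hp =>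
    let start := hp + header.toList.length
    match pvLoopA (cs.drop start) start skip 0 none with
    | none => some (String.ofList (cs.drop start))               -- text[start:], 0 ≤ start: exact
    | some np => some (String.ofList ((cs.take np).drop start))  -- text[start:np], 0 ≤ start, 0 ≤ np: exact

-- ===== PORT B =====
def text_between_header_and_number_alt (text : String) (header : String) (skip : Int) : Option String :=
  let start? : Option Nat :=
    if header = "" then some 0
    else
      let p := PySem.Str.find text header
      if p = -1 then none else some (p.toNat + header.toList.length)
  match start? with
  | none => none
  | some start =>
    let tail := text.toList.drop start                       -- text[start:], 0 ≤ start: exact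
    let positions : List Int := (PySem.List.enumerate tail 0).filterMap
        (fun ic => if PySem.Chars.isdigit ic.2 then some ic.1 else none)
    if positions = [] then some (String.ofList tail)
    else
      let cut : Int :=
        if 0 ≤ skip ∧ skip < positions.length then positions.getD skip.toNat 0
        else positions.getLastD 0
      some (String.ofList (tail.take cut.toNat))                 -- tail[:cut], 0 ≤ cut: exact

-- ===== PRECONDITION & SPEC =====
def Spec_text_between_header_and_number (text : String) (header : String) (skip : Int) (out : Option String) : Prop := out = text_between_header_and_number_alt text header skip
instance (text : String) (header : String) (skip : Int) (out : Option String) : Decidable (Spec_text_between_header_and_number text header skip out) := by unfold Spec_text_between_header_and_number; infer_instance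

-- ===== CLAIM (what is proved, stated in full; the proofs are below) =====
def Claim_equal_text_between_header_and_number : Prop := ∀ (text : String) (header : String) (skip : Int), Dom_text_between_header_and_number text header skip → Spec_text_between_header_and_number text header skip (text_between_header_and_number text header skip)

-- ===== LEMMAS AND PROOFS =====

-- relative digit positions of a char list
def pvPos : List Char → List Nat
  | [] => []
  | c :: rs => if PySem.Chars.isdigit c then 0 :: (pvPos rs).map (· + 1) else (pvPos rs).map (· + 1)

-- the index A's loop ends at, relative to the tail, as a selection from pvPos
def pvPick (r : Int) (P : List Nat) : Nat :=
  if 0 ≤ r ∧ r < P.length then P.getD r.toNat 0 else P.getLastD 0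

theorem pvGetLastD_map {α β : Type} (f : α → β) (P : List α) (h : P ≠ []) (d : β) (d' : α) :
    (P.map f).getLastD d = f (P.getLastD d') := by
  rw [List.getLastD_eq_getLast?, List.getLastD_eq_getLast?, List.getLast?_map]
  cases hq : P.getLast? with
  | none => exact absurd (List.getLast?_eq_none_iff.mp hq) h
  | some v => simp

theorem pvPick_zero_cons (l : List Nat) : pvPick 0 (0 :: l) = 0 := by
  unfold pvPick
  rw [if_pos ⟨le_refl 0, by exact_mod_cast l.length.succ_pos⟩]
  rfl

theorem pvPick_map (r : Int) (P : List Nat) (h : P ≠ []) :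
    pvPick r (P.map (· + 1)) = pvPick r P + 1 := by
  unfold pvPick
  simp only [List.length_map]
  split_ifs with hc
  · obtain ⟨h0, hl⟩ := hc
    have hlt : r.toNat < P.length := by omega
    rw [List.getD_eq_getElem _ _ (by simpa using hlt), List.getD_eq_getElem _ _ hlt]
    simp
  · rw [pvGetLastD_map _ _ h _ 0]

theorem pvPick_cons (r : Int) (P : List Nat) (h : P ≠ []) (hr : r ≠ 0) :
    pvPick r (0 :: P.map (· + 1)) = pvPick (r - 1) P + 1 := by
  unfold pvPick
  simp only [List.length_cons, List.length_map]
  split_ifs with h1 h2 h2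
  · have hr1 : 1 ≤ r := by omega
    have hlt : r.toNat - 1 < P.length := by omega
    have hsucc : r.toNat = (r.toNat - 1) + 1 := by omega
    rw [hsucc, List.getD_cons_succ]
    have h3 : (r - 1).toNat = r.toNat - 1 := by omega
    rw [h3, List.getD_eq_getElem _ _ (by simpa using hlt), List.getD_eq_getElem _ _ hlt]
    simp
  · exfalso; omega
  · exfalso; omega
  · have hm : P.map (· + 1) ≠ [] := by simpa using h
    rw [List.getLastD_cons, pvGetLastD_map _ _ h 0 0]

theorem pvLoopA_eq (l : List Char) (i : Nat) (skip skipped : Int) (npos : Option Nat) :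
    pvLoopA l i skip skipped npos =
      if pvPos l = [] then npos else some (i + pvPick (skip - skipped) (pvPos l)) := by
  induction l generalizing i skipped npos with
  | nil => simp [pvLoopA, pvPos]
  | cons c rs ih =>
    by_cases hd : PySem.Chars.isdigit c
    · have hpos : pvPos (c :: rs) = 0 :: (pvPos rs).map (· + 1) := by simp [pvPos, hd]
      simp only [pvLoopA, hd, if_true]
      by_cases he : skipped = skip
      · rw [if_pos he, hpos,
            if_neg (show (0 :: (pvPos rs).map (· + 1) : List Nat) ≠ [] by simp)]
        subst he
        rw [sub_self, pvPick_zero_cons]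
        simp
      · rw [if_neg he, ih, hpos,
            if_neg (show (0 :: (pvPos rs).map (· + 1) : List Nat) ≠ [] by simp)]
        have hne : skip - skipped ≠ 0 := by omega
        by_cases hP : pvPos rs = []
        · rw [if_pos hP, hP]
          simp only [List.map_nil]
          have h0 : pvPick (skip - skipped) [0] = 0 := by
            unfold pvPick
            split_ifs with hc
            · have : (skip - skipped).toNat = 0 := by
                rcases hc with ⟨h1, h2⟩
                simp at h2
                omega
              simp [this]
            · rfl
          rw [h0]
          simp
        · rw [if_neg hP]
          have hs : skip - (skipped + 1) = (skip - skipped) - 1 := by ring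
          rw [hs, pvPick_cons _ _ hP hne]
          congr 1
          omega
    · have hpos : pvPos (c :: rs) = (pvPos rs).map (· + 1) := by simp [pvPos, hd]
      have hstep : pvLoopA (c :: rs) i skip skipped npos = pvLoopA rs (i+1) skip skipped npos := by
        simp [pvLoopA, hd]
      rw [hstep, ih, hpos]
      by_cases hP : pvPos rs = []
      · simp [hP]
      · rw [if_neg hP,
            if_neg (show ((pvPos rs).map (· + 1) : List Nat) ≠ [] by simpa using hP),
            pvPick_map _ _ hP]
        congr 1
        omega

theorem pvPositions_eq (tail : List Char) (s : Int) :
    (PySem.List.enumerate tail s).filterMap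
        (fun ic => if PySem.Chars.isdigit ic.2 then some ic.1 else none)
      = (pvPos tail).map (fun n : Nat => s + (n : Int)) := by
  induction tail generalizing s with
  | nil => simp [PySem.List.enumerate_nil, pvPos]
  | cons c rs ih =>
    rw [PySem.List.enumerate_cons, List.filterMap_cons]
    by_cases hd : PySem.Chars.isdigit c
    · simp only [hd, if_true, pvPos, ih, List.map_cons, List.map_map]
      refine List.cons_eq_cons.mpr ⟨by simp, ?_⟩
      apply List.map_congr_left
      intro n _
      simp only [Function.comp_apply]
      push_cast
      ring
    · simp only [hd, Bool.false_eq_true, if_false, pvPos, ih, List.map_map]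
      apply List.map_congr_left
      intro n _
      simp only [Function.comp_apply]
      push_cast
      ring

theorem pvCore (cs : List Char) (start : Nat) (skip : Int) :
    (match pvLoopA (cs.drop start) start skip 0 none with
     | none => some (String.ofList (cs.drop start))
     | some np => some (String.ofList ((cs.take np).drop start)))
    = (let tail := cs.drop start
       let positions : List Int := (PySem.List.enumerate tail 0).filterMap
           (fun ic => if PySem.Chars.isdigit ic.2 then some ic.1 else none)
       if positions = [] then some (String.ofList tail)
       else
         let cut : Int :=
           if 0 ≤ skip ∧ skip < positions.length then positions.getD skip.toNat 0
           else positions.getLastD 0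
         some (String.ofList (tail.take cut.toNat))) := by
  simp only [pvLoopA_eq, pvPositions_eq]
  by_cases hP : pvPos (cs.drop start) = []
  · simp [hP]
  · rw [if_neg hP,
        if_neg (show ((pvPos (cs.drop start)).map (fun n : Nat => (0:Int) + (n : Int))) ≠ [] by
          simpa using hP)]
    simp only [sub_zero]
    have htake : (cs.take (start + pvPick skip (pvPos (cs.drop start)))).drop start
        = (cs.drop start).take (pvPick skip (pvPos (cs.drop start))) := by
      rw [List.drop_take]
      congr 1
      omega
    show some (String.ofList ((cs.take (start + pvPick skip (pvPos (cs.drop start)))).drop start)) = _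
    rw [htake]
    set P := pvPos (cs.drop start) with hPdef
    by_cases hc : 0 ≤ skip ∧ skip < ((P.map (fun n : Nat => (0:Int) + (n : Int))).length : Int)
    · rw [if_pos hc]
      have hk : skip.toNat < P.length := by
        obtain ⟨h1, h2⟩ := hc
        simp only [List.length_map] at h2
        omega
      have hmap : (P.map (fun n : Nat => (0:Int) + (n : Int))).getD skip.toNat 0
          = (P[skip.toNat]'hk : Int) := by
        rw [List.getD_eq_getElem _ _ (by simpa using hk)]
        simp
      have hpick : pvPick skip P = P[skip.toNat]'hk := by
        unfold pvPick
        rw [if_pos (by simpa using hc), List.getD_eq_getElem _ _ hk]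
      rw [hmap, hpick]
      simp
    · rw [if_neg hc]
      have hmap : (P.map (fun n : Nat => (0:Int) + (n : Int))).getLastD 0
          = (P.getLastD 0 : Int) := by
        rw [pvGetLastD_map _ _ hP _ 0]
        simp
      have hpick : pvPick skip P = P.getLastD 0 := by
        unfold pvPick
        rw [if_neg (by simpa using hc)]
      rw [hmap, hpick]
      simp

theorem text_between_header_and_number_main (text header : String) (skip : Int) :
    text_between_header_and_number text header skip
      = text_between_header_and_number_alt text header skip := by
  unfold text_between_header_and_number text_between_header_and_number_alt
  by_cases hh : header = ""
  · subst hh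
    simpa using pvCore text.toList (0 + ("" : String).toList.length) skip
  · rw [if_neg hh, if_neg hh]
    by_cases hf : PySem.Str.find text header = -1
    · have hf' : PySem.Chars.find text.toList header.toList = -1 := by simpa using hf
      simp [hf']
    · have hf' : ¬ PySem.Chars.find text.toList header.toList = -1 := by simpa using hf
      simp only [PySem.Str.find_eq, if_neg hf']
      exact pvCore text.toList
        ((PySem.Chars.find text.toList header.toList).toNat + header.toList.length) skip

-- ===== VERDICT (by name: the statement is the Claim_ definition above) =====
theorem text_between_header_and_number_spec : Claim_equal_text_between_header_and_number := by
  intro text header skip _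
  unfold Spec_text_between_header_and_number
  exact text_between_header_and_number_main text header skip
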